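-- pv_equiv track=rewrite | github.com/gouravkargwal/better-bundle-monorepo | python-worker/tests/test_recommendation_quality.py | _get_customer_pool
-- ===== SOURCE A (Python) =====
-- from typing import Dict, List, Any
--
-- CUSTOMERS = {
--     # Power buyers (3)
--     "cust_power_1": {"type": "power", "primary_category": "Electronics", "aov": 350, "purchases": 25, "ltv": 8750},
--     "cust_power_2": {"type": "power", "primary_category": "Clothing", "aov": 200, "purchases": 30, "ltv": 6000},
--     "cust_power_3": {"type": "power", "primary_category": "Home", "aov": 280, "purchases": 20, "ltv": 5600},
--     # Regular shoppers (5)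
--     "cust_regular_1": {"type": "regular", "primary_category": "Electronics", "aov": 120, "purchases": 10, "ltv": 1200},
--     "cust_regular_2": {"type": "regular", "primary_category": "Sports", "aov": 80, "purchases": 8, "ltv": 640},
--     "cust_regular_3": {"type": "regular", "primary_category": "Beauty", "aov": 60, "purchases": 12, "ltv": 720},
--     "cust_regular_4": {"type": "regular", "primary_category": "Clothing", "aov": 100, "purchases": 7, "ltv": 700},
--     "cust_regular_5": {"type": "regular", "primary_category": "Home", "aov": 90, "purchases": 9, "ltv": 810},
--     # Casual browsers (7)
--     "cust_casual_1": {"type": "casual", "primary_category": "Electronics", "aov": 50, "purchases": 3, "ltv": 150},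
--     "cust_casual_2": {"type": "casual", "primary_category": "Clothing", "aov": 40, "purchases": 2, "ltv": 80},
--     "cust_casual_3": {"type": "casual", "primary_category": "Home", "aov": 30, "purchases": 2, "ltv": 60},
--     "cust_casual_4": {"type": "casual", "primary_category": "Sports", "aov": 45, "purchases": 3, "ltv": 135},
--     "cust_casual_5": {"type": "casual", "primary_category": "Beauty", "aov": 35, "purchases": 2, "ltv": 70},
--     "cust_casual_6": {"type": "casual", "primary_category": "Electronics", "aov": 55, "purchases": 4, "ltv": 220},
--     "cust_casual_7": {"type": "casual", "primary_category": "Clothing", "aov": 25, "purchases": 1, "ltv": 25},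
--     # New/cold start (5)
--     "cust_new_1": {"type": "new", "primary_category": None, "aov": 0, "purchases": 0, "ltv": 0},
--     "cust_new_2": {"type": "new", "primary_category": None, "aov": 0, "purchases": 0, "ltv": 0},
--     "cust_new_3": {"type": "new", "primary_category": "Electronics", "aov": 30, "purchases": 1, "ltv": 30},
--     "cust_new_4": {"type": "new", "primary_category": "Beauty", "aov": 20, "purchases": 1, "ltv": 20},
--     "cust_new_5": {"type": "new", "primary_category": None, "aov": 0, "purchases": 0, "ltv": 0},
-- }
--
-- CUSTOMER_IDS = list(CUSTOMERS.keys())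
--
-- def _get_customer_pool(pool_name: str) -> List[str]:
--     """Get customer IDs matching a pool name"""
--     if pool_name == "all":
--         return [c for c, info in CUSTOMERS.items() if info["type"] != "new"]
--     elif pool_name == "power_regular":
--         return [c for c, info in CUSTOMERS.items() if info["type"] in ("power", "regular")]
--     elif pool_name == "power":
--         return [c for c, info in CUSTOMERS.items() if info["type"] == "power"]
--     return CUSTOMER_IDS
-- ===== SOURCE B (Python) =====
-- from typing import Dict, List, Any
--
-- CUSTOMERS = {
--     "cust_power_1": {"type": "power", "primary_category": "Electronics", "aov": 350, "purchases": 25, "ltv": 8750},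
--     "cust_power_2": {"type": "power", "primary_category": "Clothing", "aov": 200, "purchases": 30, "ltv": 6000},
--     "cust_power_3": {"type": "power", "primary_category": "Home", "aov": 280, "purchases": 20, "ltv": 5600},
--     "cust_regular_1": {"type": "regular", "primary_category": "Electronics", "aov": 120, "purchases": 10, "ltv": 1200},
--     "cust_regular_2": {"type": "regular", "primary_category": "Sports", "aov": 80, "purchases": 8, "ltv": 640},
--     "cust_regular_3": {"type": "regular", "primary_category": "Beauty", "aov": 60, "purchases": 12, "ltv": 720},
--     "cust_regular_4": {"type": "regular", "primary_category": "Clothing", "aov": 100, "purchases": 7, "ltv": 700},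
--     "cust_regular_5": {"type": "regular", "primary_category": "Home", "aov": 90, "purchases": 9, "ltv": 810},
--     "cust_casual_1": {"type": "casual", "primary_category": "Electronics", "aov": 50, "purchases": 3, "ltv": 150},
--     "cust_casual_2": {"type": "casual", "primary_category": "Clothing", "aov": 40, "purchases": 2, "ltv": 80},
--     "cust_casual_3": {"type": "casual", "primary_category": "Home", "aov": 30, "purchases": 2, "ltv": 60},
--     "cust_casual_4": {"type": "casual", "primary_category": "Sports", "aov": 45, "purchases": 3, "ltv": 135},
--     "cust_casual_5": {"type": "casual", "primary_category": "Beauty", "aov": 35, "purchases": 2, "ltv": 70},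
--     "cust_casual_6": {"type": "casual", "primary_category": "Electronics", "aov": 55, "purchases": 4, "ltv": 220},
--     "cust_casual_7": {"type": "casual", "primary_category": "Clothing", "aov": 25, "purchases": 1, "ltv": 25},
--     "cust_new_1": {"type": "new", "primary_category": None, "aov": 0, "purchases": 0, "ltv": 0},
--     "cust_new_2": {"type": "new", "primary_category": None, "aov": 0, "purchases": 0, "ltv": 0},
--     "cust_new_3": {"type": "new", "primary_category": "Electronics", "aov": 30, "purchases": 1, "ltv": 30},
--     "cust_new_4": {"type": "new", "primary_category": "Beauty", "aov": 20, "purchases": 1, "ltv": 20},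
--     "cust_new_5": {"type": "new", "primary_category": None, "aov": 0, "purchases": 0, "ltv": 0},
-- }
--
-- CUSTOMER_IDS = list(CUSTOMERS.keys())
--
--
-- def _get_customer_pool(pool_name: str) -> List[str]:
--     """Get customer IDs matching a pool name (single grouping pass + concatenation)."""
--     groups: Dict[str, List[str]] = {}
--     for cid, info in CUSTOMERS.items():
--         groups.setdefault(info["type"], []).append(cid)
--     if pool_name == "power":
--         return groups.get("power", [])
--     if pool_name == "power_regular":
--         return groups.get("power", []) + groups.get("regular", [])
--     if pool_name == "all":
--         return groups.get("power", []) + groups.get("regular", []) + groups.get("casual", [])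
--     return CUSTOMER_IDS
-- ===== Notes on version B (the rewrite author's own statement) =====
-- stated objective: alternative
-- what changed: B replaces A's three separate filtered scans of CUSTOMERS (one comprehension per pool name) with a single grouping pass that buckets customer ids by type into a dict, then answers each pool by concatenating the relevant buckets.
import Mathlib
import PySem

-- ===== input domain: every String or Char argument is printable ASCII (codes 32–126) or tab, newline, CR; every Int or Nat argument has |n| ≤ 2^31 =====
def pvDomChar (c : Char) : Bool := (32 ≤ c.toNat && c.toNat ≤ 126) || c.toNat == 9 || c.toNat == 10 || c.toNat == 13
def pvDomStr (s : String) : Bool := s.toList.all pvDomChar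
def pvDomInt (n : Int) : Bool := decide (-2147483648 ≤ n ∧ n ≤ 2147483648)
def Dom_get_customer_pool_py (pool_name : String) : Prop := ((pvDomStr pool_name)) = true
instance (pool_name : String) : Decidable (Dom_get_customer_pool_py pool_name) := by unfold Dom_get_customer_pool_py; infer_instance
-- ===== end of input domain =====

-- B replaces A's three filtered scans of the static CUSTOMERS dict by one grouping
-- pass keyed on the customer type followed by bucket concatenation (objective: alternative).
-- The module constant CUSTOMERS is modelled by its (id, type) pairs: both programs
-- consult only info["type"] of each value.

-- ===== PORT A =====
def pvCUSTOMERS : List (String × String) :=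
  [("cust_power_1", "power"), ("cust_power_2", "power"), ("cust_power_3", "power"),
   ("cust_regular_1", "regular"), ("cust_regular_2", "regular"), ("cust_regular_3", "regular"),
   ("cust_regular_4", "regular"), ("cust_regular_5", "regular"),
   ("cust_casual_1", "casual"), ("cust_casual_2", "casual"), ("cust_casual_3", "casual"),
   ("cust_casual_4", "casual"), ("cust_casual_5", "casual"), ("cust_casual_6", "casual"),
   ("cust_casual_7", "casual"),
   ("cust_new_1", "new"), ("cust_new_2", "new"), ("cust_new_3", "new"),
   ("cust_new_4", "new"), ("cust_new_5", "new")]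

def pvCUSTOMER_IDS : List String := pvCUSTOMERS.map Prod.fst

def get_customer_pool_py (pool_name : String) : List String :=
  if pool_name == "all" then
    (pvCUSTOMERS.filter (fun ci => ci.2 != "new")).map Prod.fst
  else if pool_name == "power_regular" then
    (pvCUSTOMERS.filter (fun ci => ci.2 == "power" || ci.2 == "regular")).map Prod.fst
  else if pool_name == "power" then
    (pvCUSTOMERS.filter (fun ci => ci.2 == "power")).map Prod.fst
  else pvCUSTOMER_IDS

-- ===== PORT B =====
-- groups.setdefault(info["type"], []).append(cid), one pass over CUSTOMERS
def pvGroups : PySem.Dict String (List String) :=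
  pvCUSTOMERS.foldl (fun d ci => d.modify ci.2 [] (fun xs => xs ++ [ci.1])) PySem.Dict.empty

def get_customer_pool_py_alt (pool_name : String) : List String :=
  let g := pvGroups
  if pool_name == "power" then g.getD "power" []
  else if pool_name == "power_regular" then g.getD "power" [] ++ g.getD "regular" []
  else if pool_name == "all" then
    g.getD "power" [] ++ g.getD "regular" [] ++ g.getD "casual" []
  else pvCUSTOMER_IDS

-- ===== PRECONDITION & SPEC =====
def Spec_get_customer_pool_py (pool_name : String) (out : List String) : Prop := out = get_customer_pool_py_alt pool_name
instance (pool_name : String) (out : List String) : Decidable (Spec_get_customer_pool_py pool_name out) := by unfold Spec_get_customer_pool_py; infer_instance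

-- ===== CLAIM (what is proved, stated in full; the proofs are below) =====
def Claim_equal_get_customer_pool_py : Prop := ∀ (pool_name : String), Dom_get_customer_pool_py pool_name → Spec_get_customer_pool_py pool_name (get_customer_pool_py pool_name)

-- ===== LEMMAS AND PROOFS =====
theorem pv_agree (pool_name : String) :
    get_customer_pool_py pool_name = get_customer_pool_py_alt pool_name := by
  by_cases h1 : pool_name = "all"
  · subst h1; decide
  · by_cases h2 : pool_name = "power_regular"
    · subst h2; decide
    · by_cases h3 : pool_name = "power"
      · subst h3; decide
      · simp [get_customer_pool_py, get_customer_pool_py_alt, h1, h2, h3]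

-- ===== VERDICT (by name: the statement is the Claim_ definition above) =====
theorem get_customer_pool_py_spec : Claim_equal_get_customer_pool_py := by
  intro p _
  exact pv_agree p
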